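-- pv_equiv track=rewrite | github.com/bitterengsci/algorithm | OA/facebook-pile.py | pilesOfBoxes
-- ===== SOURCE A (Python) =====
-- def pilesOfBoxes(boxesInPiles):
--     # Write your code here
--     pile = count_pile(boxesInPiles)
--     key = list(pile.keys())
--     key.sort()
--
--     count = 0
--     for i in range(1, len(key)):
--         count += i * pile[key[i]]
--     return count
--
-- def count_pile(boxesInPiles):
--     dic = dict()
--     for item in boxesInPiles:
--         if item in dic:
--             dic[item] += 1
--         else:
--             dic[item] = 1
--     return dic
-- ===== SOURCE B (Python) =====
-- def pilesOfBoxes(boxesInPiles):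
--     total = 0
--     rank = 0
--     prev = None
--     first = True
--     for x in sorted(boxesInPiles):
--         if first:
--             first = False
--         elif x != prev:
--             rank += 1
--         total += rank
--         prev = x
--     return total
-- ===== Notes on version B (the rewrite author's own statement) =====
-- stated objective: alternative
-- what changed: Replaces the frequency dictionary plus key-sort plus rank*frequency loop with sorting the whole list and one linear pass that keeps a running rank (incremented whenever the value changes) and adds the rank for every element.
import Mathlib
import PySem

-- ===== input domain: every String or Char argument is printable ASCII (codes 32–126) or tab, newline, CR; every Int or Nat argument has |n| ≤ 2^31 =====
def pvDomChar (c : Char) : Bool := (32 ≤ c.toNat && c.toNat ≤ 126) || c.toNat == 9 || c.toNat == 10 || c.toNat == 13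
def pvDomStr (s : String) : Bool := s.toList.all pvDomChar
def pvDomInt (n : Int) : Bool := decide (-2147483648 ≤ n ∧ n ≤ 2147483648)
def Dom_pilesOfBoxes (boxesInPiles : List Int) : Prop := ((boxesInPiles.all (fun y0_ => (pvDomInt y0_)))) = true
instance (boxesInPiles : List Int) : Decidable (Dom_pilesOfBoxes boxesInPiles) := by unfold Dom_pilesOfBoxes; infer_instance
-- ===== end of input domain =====

-- B replaces A's frequency-dictionary + key-sort + rank*frequency loop by sorting the whole
-- list and one linear pass with a running rank (objective: alternative decomposition; A's
-- in-place sort of the local dict-key list is not observable to the caller).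

-- ===== PORT A =====
-- one step of count_pile's loop: 'if item in dic: dic[item] += 1 else: dic[item] = 1'
def pvCountStep (d : PySem.Dict Int Int) (item : Int) : PySem.Dict Int Int :=
  if d.contains item then d.modify item 0 (· + 1) else d.insert item 1

def pvCountPile (boxesInPiles : List Int) : PySem.Dict Int Int :=
  boxesInPiles.foldl pvCountStep PySem.Dict.empty

def pilesOfBoxes (boxesInPiles : List Int) : Int :=
  let pile := pvCountPile boxesInPiles
  let key := PySem.List.sorted pile.keys id
  -- key[i] via pyGetD (exact: 1 ≤ i < len(key)); pile[key[i]] via getD (exact: key[i] ∈ pile)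
  (PySem.List.pyRange 1 (key.length : Int)).foldl
    (fun count i => count + i * pile.getD (PySem.List.pyGetD key i 0) 0) 0

-- ===== PORT B =====
-- state (total, rank, prev); prev = none exactly while 'first' is True in Source B
def pvStepB (st : Int × Int × Option Int) (x : Int) : Int × Int × Option Int :=
  match st with
  | (total, rank, none) => (total + rank, rank, some x)
  | (total, rank, some prev) =>
      let rank' := if x ≠ prev then rank + 1 else rank
      (total + rank', rank', some x)

def pilesOfBoxes_alt (boxesInPiles : List Int) : Int :=
  ((PySem.List.sorted boxesInPiles id).foldl pvStepB (0, 0, none)).1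

-- ===== PRECONDITION & SPEC =====
def Spec_pilesOfBoxes (boxesInPiles : List Int) (out : Int) : Prop := out = pilesOfBoxes_alt boxesInPiles
instance (boxesInPiles : List Int) (out : Int) : Decidable (Spec_pilesOfBoxes boxesInPiles out) := by unfold Spec_pilesOfBoxes; infer_instance

-- ===== CLAIM (what is proved, stated in full; the proofs are below) =====
def Claim_equal_pilesOfBoxes : Prop := ∀ (boxesInPiles : List Int), Dom_pilesOfBoxes boxesInPiles → Spec_pilesOfBoxes boxesInPiles (pilesOfBoxes boxesInPiles)

-- ===== LEMMAS AND PROOFS =====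

def pvCnt (xs : List Int) (v : Int) : Int := (xs.count v : Int)

def pvGroup (xs : List Int) (k : Int) : List Int := List.replicate (xs.count k) k

def pvWsum : Int → List Int → Int
  | _, [] => 0
  | r, c :: cs => r * c + pvWsum (r + 1) cs

-- the sorted distinct-key list both programs are really about
def pvK (xs : List Int) : List Int := PySem.List.sorted (pvCountPile xs).keys id

-- ---- the counting dict ----

theorem pvStep_keys (d : PySem.Dict Int Int) (x : Int) :
    (pvCountStep d x).keys = (d.insert x (if d.contains x then d.getD x 0 + 1 else 1)).keys := by
  unfold pvCountStep
  split_ifs with h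
  · exact PySem.Dict.keys_modify d x 0 (· + 1)
  · rfl

theorem pvUpdate_insert (d : PySem.Dict Int Int) (x w : Int) (xs : List Int) :
    PySem.Set.update (d.keys) (x :: xs) = PySem.Set.update ((d.insert x w).keys) xs := by
  have h1 := PySem.Dict.keys_foldl_insert (ν := Int) (x :: xs) (fun _ _ => w) d
  have h2 := PySem.Dict.keys_foldl_insert (ν := Int) xs (fun _ _ => w) (d.insert x w)
  simp only [List.foldl_cons] at h1
  rw [← h1, ← h2]

theorem pvFold_keys (xs : List Int) : ∀ d : PySem.Dict Int Int,
    (xs.foldl pvCountStep d).keys = PySem.Set.update d.keys xs := by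
  induction xs with
  | nil => intro d; simp [PySem.Set.update]
  | cons x xs ih =>
      intro d
      rw [List.foldl_cons, ih (pvCountStep d x)]
      have hk := pvStep_keys d x
      rw [hk, ← pvUpdate_insert]

theorem pvFold_getD (xs : List Int) : ∀ (d : PySem.Dict Int Int) (v : Int),
    (xs.foldl pvCountStep d).getD v 0 = d.getD v 0 + (xs.count v : Int) := by
  induction xs with
  | nil => intro d v; simp
  | cons x xs ih =>
      intro d v
      rw [List.foldl_cons, ih (pvCountStep d x) v]
      have hstep : (pvCountStep d x).getD v 0 = d.getD v 0 + if v = x then 1 else 0 := by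
        by_cases hv : v = x
        · subst hv
          rw [if_pos rfl]
          unfold pvCountStep
          split_ifs with h
          · rw [PySem.Dict.getD_modify_self]
          · rw [PySem.Dict.getD_insert, if_pos rfl,
              PySem.Dict.getD_of_not_contains d 0 (by simpa using h)]
            norm_num
        · rw [if_neg hv]
          unfold pvCountStep
          split_ifs with h
          · rw [PySem.Dict.getD_modify, if_neg hv]
            omega
          · rw [PySem.Dict.getD_insert, if_neg hv]
            omega
      rw [hstep, List.count_cons]
      by_cases hv : v = x
      · simp [hv]; ring
      · simp [hv, Ne.symm hv]

theorem pvPile_getD (xs : List Int) (v : Int) :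
    (pvCountPile xs).getD v 0 = (xs.count v : Int) := by
  have := pvFold_getD xs PySem.Dict.empty v
  simpa [pvCountPile] using this

theorem pvPile_keys (xs : List Int) :
    (pvCountPile xs).keys = (PySem.Dict.counter xs).keys := by
  have h1 := pvFold_keys xs PySem.Dict.empty
  have h2 := PySem.Dict.keys_foldl_insert (ν := Int) xs
      (fun d x => d.getD x 0 + 1) PySem.Dict.empty
  rw [PySem.Dict.foldl_insert_getD_add_one_eq_counter] at h2
  rw [pvCountPile, h1, ← h2]

theorem pvK_nodup (xs : List Int) : (pvK xs).Nodup := by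
  have hp := PySem.List.sorted_perm ((pvCountPile xs).keys) id false
  refine hp.nodup_iff.mpr ?_
  rw [pvPile_keys, PySem.Dict.keys_counter]
  exact PySem.Set.nodup_ofList xs

theorem pvK_mem (xs : List Int) (v : Int) : v ∈ pvK xs ↔ v ∈ xs := by
  have hp := PySem.List.sorted_perm ((pvCountPile xs).keys) id false
  rw [pvK, hp.mem_iff, pvPile_keys, PySem.Dict.keys_counter]
  exact PySem.Set.mem_ofList xs v

theorem pvK_lt (xs : List Int) : (pvK xs).Pairwise (· < ·) := by
  have hle : (pvK xs).Pairwise (· ≤ ·) :=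
    PySem.List.sorted_pairwise ((pvCountPile xs).keys) id
  have hne := pvK_nodup xs
  exact (hle.and hne).imp (fun h => lt_of_le_of_ne h.1 h.2)

-- ---- grouping: sorted(xs) is the sorted distinct values, each repeated its count ----

theorem pvFlat_count (xs : List Int) (L : List Int) (v : Int) (hnd : L.Nodup) :
    (L.flatMap (pvGroup xs)).count v = if v ∈ L then xs.count v else 0 := by
  induction L with
  | nil => simp
  | cons k L ih =>
      rw [List.nodup_cons] at hnd
      rw [List.flatMap_cons, List.count_append, ih hnd.2]
      by_cases hv : v = k
      · subst hv
        rw [pvGroup, List.count_replicate]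
        simp [hnd.1]
      · simp [pvGroup, List.count_replicate, hv, Ne.symm hv, List.mem_cons]

theorem pvFlat_perm (xs : List Int) : ((pvK xs).flatMap (pvGroup xs)).Perm xs := by
  rw [List.perm_iff_count]
  intro v
  rw [pvFlat_count xs _ v (pvK_nodup xs)]
  by_cases hv : v ∈ pvK xs
  · simp [hv]
  · have hvx : v ∉ xs := fun h => hv ((pvK_mem xs v).mpr h)
    simp [hv, List.count_eq_zero_of_not_mem hvx]

theorem pvFlat_sorted (xs : List Int) (L : List Int) (hL : L.Pairwise (· < ·)) :
    (L.flatMap (pvGroup xs)).Pairwise (· ≤ ·) := by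
  induction L with
  | nil => simp
  | cons k L ih =>
      rw [List.pairwise_cons] at hL
      rw [List.flatMap_cons, List.pairwise_append]
      refine ⟨?_, ih hL.2, ?_⟩
      · exact List.pairwise_replicate.mpr (Or.inr (le_refl k))
      · intro a ha b hb
        have ha' := (List.mem_replicate.mp ha).2
        obtain ⟨k', hk', hb'⟩ := List.mem_flatMap.mp hb
        have hb'' := (List.mem_replicate.mp hb').2
        rw [ha', hb'']
        exact le_of_lt (hL.1 k' hk')

theorem pvGrouping (xs : List Int) :
    PySem.List.sorted xs id = (pvK xs).flatMap (pvGroup xs) := by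
  refine List.eq_of_perm_of_sorted (le := (· ≤ ·))
    (fun a b _ _ h1 h2 => le_antisymm h1 h2)
    (PySem.List.sorted_pairwise xs id)
    (pvFlat_sorted xs _ (pvK_lt xs))
    ((PySem.List.sorted_perm xs id false).trans (pvFlat_perm xs).symm)

-- ---- B's single pass over the grouped sorted list ----

theorem pvRun (m : Nat) : ∀ (t r k : Int),
    List.foldl pvStepB (t, r, some k) (List.replicate m k) = (t + r * m, r, some k) := by
  induction m with
  | zero => intro t r k; simp
  | succ m ih =>
      intro t r k
      rw [List.replicate_succ, List.foldl_cons]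
      have hstep : pvStepB (t, r, some k) k = (t + r, r, some k) := by
        simp [pvStepB]
      rw [hstep, ih]
      refine Prod.ext ?_ rfl
      show t + r + r * (m : Int) = t + r * ((m + 1 : Nat) : Int)
      push_cast; ring

theorem pvGroupFold (c : Nat) (hc : 0 < c) (t r p k : Int) (hpk : p ≠ k) :
    List.foldl pvStepB (t, r, some p) (List.replicate c k) = (t + (r + 1) * c, r + 1, some k) := by
  obtain ⟨m, rfl⟩ : ∃ m, c = m + 1 := ⟨c - 1, (Nat.succ_pred_eq_of_pos hc).symm⟩
  rw [List.replicate_succ, List.foldl_cons]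
  have hstep : pvStepB (t, r, some p) k = (t + (r + 1), r + 1, some k) := by
    simp [pvStepB, Ne.symm hpk]
  rw [hstep, pvRun]
  refine Prod.ext ?_ rfl
  show t + (r + 1) + (r + 1) * (m : Int) = t + (r + 1) * ((m + 1 : Nat) : Int)
  push_cast; ring

theorem pvGroupFold0 (c : Nat) (hc : 0 < c) (t r k : Int) :
    List.foldl pvStepB (t, r, none) (List.replicate c k) = (t + r * c, r, some k) := by
  obtain ⟨m, rfl⟩ : ∃ m, c = m + 1 := ⟨c - 1, (Nat.succ_pred_eq_of_pos hc).symm⟩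
  rw [List.replicate_succ, List.foldl_cons]
  have hstep : pvStepB (t, r, none) k = (t + r, r, some k) := by
    simp [pvStepB]
  rw [hstep, pvRun]
  refine Prod.ext ?_ rfl
  show t + r + r * (m : Int) = t + r * ((m + 1 : Nat) : Int)
  push_cast; ring

theorem pvChain (xs : List Int) : ∀ (L : List Int) (t r p : Int),
    L.Pairwise (· < ·) → (∀ k ∈ L, p < k) → (∀ k ∈ L, 0 < xs.count k) →
    List.foldl pvStepB (t, r, some p) (L.flatMap (pvGroup xs)) =
      (t + pvWsum (r + 1) (L.map (pvCnt xs)), r + L.length, some (L.getLastD p)) := by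
  intro L
  induction L with
  | nil => intro t r p _ _ _; simp [pvWsum]
  | cons k L ih =>
      intro t r p hL hp hc
      rw [List.pairwise_cons] at hL
      rw [List.flatMap_cons, List.foldl_append]
      simp only [pvGroup]
      rw [pvGroupFold (xs.count k) (by simpa using hc k List.mem_cons_self) t r p k
        (ne_of_lt (hp k List.mem_cons_self))]
      have ihr := ih (t + (r + 1) * (xs.count k)) (r + 1) k hL.2 hL.1
        (fun k' hk' => hc k' (List.mem_cons_of_mem _ hk'))
      rw [ihr]
      refine Prod.ext ?_ (Prod.ext ?_ ?_)
      · show t + (r + 1) * (xs.count k : Int) + pvWsum (r + 1 + 1) (L.map (pvCnt xs))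
            = t + pvWsum (r + 1) ((k :: L).map (pvCnt xs))
        simp only [List.map_cons, pvWsum, pvCnt]
        ring
      · show r + 1 + (L.length : Int) = r + ((k :: L).length : Int)
        simp only [List.length_cons]; push_cast; ring
      · show some (L.getLastD k) = some ((k :: L).getLastD p)
        rw [List.getLastD_cons]

theorem pvB_eq (xs : List Int) :
    pilesOfBoxes_alt xs = pvWsum 0 ((pvK xs).map (pvCnt xs)) := by
  rw [pilesOfBoxes_alt, pvGrouping xs]
  rcases hK : pvK xs with _ | ⟨k, L⟩
  · simp [pvWsum]
  · have hlt := pvK_lt xs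
    rw [hK] at hlt
    rw [List.pairwise_cons] at hlt
    have hcount : ∀ k' ∈ (k :: L), 0 < xs.count k' := by
      intro k' hk'
      rw [List.count_pos_iff]
      exact (pvK_mem xs k').mp (by rw [hK]; exact hk')
    rw [List.flatMap_cons, List.foldl_append]
    simp only [pvGroup]
    rw [pvGroupFold0 (xs.count k) (by simpa using hcount k List.mem_cons_self) 0 0 k]
    have hch := pvChain xs L (0 + 0 * (xs.count k)) 0 k hlt.2 hlt.1
      (fun k' hk' => hcount k' (List.mem_cons_of_mem _ hk'))
    rw [hch]
    show 0 + 0 * (xs.count k : Int) + pvWsum (0 + 1) (L.map (pvCnt xs))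
        = pvWsum 0 ((k :: L).map (pvCnt xs))
    simp only [List.map_cons, pvWsum, pvCnt]
    ring

-- ---- A's indexed sum over the sorted keys ----

theorem pvWsum_idx : ∀ (L : List Int) (r : Int),
    pvWsum r L = ((List.range L.length).map (fun (j : Nat) => (r + (j : Int)) * L.getD j 0)).sum := by
  intro L
  induction L with
  | nil => intro r; simp [pvWsum]
  | cons c cs ih =>
      intro r
      rw [List.length_cons, List.range_succ_eq_map, List.map_cons, List.sum_cons, List.map_map]
      rw [pvWsum, ih (r + 1)]
      congr 1
      · simp
      · congr 1
        refine List.map_congr_left ?_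
        intro j hj
        simp only [Function.comp_apply, Nat.succ_eq_add_one, List.getD_cons_succ]
        push_cast
        ring

theorem pvA_eq (xs : List Int) :
    pilesOfBoxes xs = pvWsum 0 ((pvK xs).map (pvCnt xs)) := by
  show (PySem.List.pyRange 1 ((pvK xs).length : Int)).foldl
      (fun count i => count + i * (pvCountPile xs).getD (PySem.List.pyGetD (pvK xs) i 0) 0) 0
    = pvWsum 0 ((pvK xs).map (pvCnt xs))
  rw [PySem.List.foldl_add]
  have hg : (fun i => i * (pvCountPile xs).getD (PySem.List.pyGetD (pvK xs) i 0) 0)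
      = fun i => i * pvCnt xs (PySem.List.pyGetD (pvK xs) i 0) := by
    funext i; simp [pvPile_getD, pvCnt]
  rw [hg]
  rcases Nat.eq_zero_or_pos (pvK xs).length with hn | hn
  · rw [List.length_eq_zero_iff.mp hn]
    norm_num [pvWsum, show PySem.List.pyRange 1 0 = [] from rfl]
  · have h1n : (1 : Int) ≤ ((pvK xs).length : Int) := by exact_mod_cast hn
    have hsplit := PySem.List.pyRange_one_append 0 1 ((pvK xs).length : Int) (by norm_num) h1n
    have hsum : ((PySem.List.pyRange 1 ((pvK xs).length : Int)).map
          (fun i => i * pvCnt xs (PySem.List.pyGetD (pvK xs) i 0))).sum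
        = ((PySem.List.pyRange 0 ((pvK xs).length : Int)).map
          (fun i => i * pvCnt xs (PySem.List.pyGetD (pvK xs) i 0))).sum := by
      rw [hsplit, List.map_append, List.sum_append,
        show PySem.List.pyRange 0 1 = [0] from rfl]
      simp
    rw [hsum, PySem.List.pyRange_zero, List.map_map]
    have hmaps : (List.range (((pvK xs).length : Int)).toNat).map
          ((fun i => i * pvCnt xs (PySem.List.pyGetD (pvK xs) i 0)) ∘ (fun (j : Nat) => (j : Int)))
        = (List.range ((pvK xs).map (pvCnt xs)).length).map
          (fun (j : Nat) => ((0 : Int) + (j : Int)) * ((pvK xs).map (pvCnt xs)).getD j 0) := by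
      rw [List.length_map, Int.toNat_natCast]
      refine List.map_congr_left ?_
      intro j hj
      have hjlt : j < (pvK xs).length := List.mem_range.mp hj
      have hidx : PySem.List.pyGetD (pvK xs) ((j : Nat) : Int) 0 = (pvK xs).getD j 0 := by
        rw [PySem.List.pyGetD_eq_getElem (pvK xs) 0 (by positivity) (by exact_mod_cast hjlt)]
        rw [List.getD_eq_getElem _ _ hjlt]
        simp
      rw [Function.comp_apply, hidx]
      rw [List.getD_eq_getElem _ _ hjlt,
        List.getD_eq_getElem _ _ (by simpa using hjlt), List.getElem_map]
      ring
    rw [hmaps, ← pvWsum_idx]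
    ring

-- ===== VERDICT (by name: the statement is the Claim_ definition above) =====
theorem pilesOfBoxes_spec : Claim_equal_pilesOfBoxes := by
  intro xs _
  unfold Spec_pilesOfBoxes
  rw [pvA_eq, pvB_eq]
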